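-- pv_equiv track=rewrite | github.com/sirjordan/yamp | dices.py | score_full
-- ===== SOURCE A (Python) =====
-- MIN_DICE = 1
--
-- MAX_DICE = 6
--
-- def count_equal(dices, num_to_match):
--     count = 0
--     for dice in dices:
--         if dice == num_to_match:
--             count += 1
--
--     return count
--
-- def score_full(dices):
--     """
--     Full = Three of one number and two of another
--     :return: 25 if have Full
--     """
--     three_matched_num = 0
--     for dice_num in range(MIN_DICE, MAX_DICE + 1):
--         threes = count_equal(dices, dice_num) == 3
--         if threes:
--             three_matched_num = dice_num
--             break
--
--     two_matched_num = 0
--     for dice_num in range(MIN_DICE, MAX_DICE + 1):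
--         if dice_num != three_matched_num:
--             twos = count_equal(dices, dice_num)
--             if twos == 2:
--                 two_matched_num = twos
--                 break
--
--     if three_matched_num > 0 and two_matched_num > 0:
--         return 25
--     else:
--         return 0
-- ===== SOURCE B (Python) =====
-- def score_full(dices):
--     """
--     Full = Three of one number and two of another
--     :return: 25 if have Full
--     """
--     tally = [0, 0, 0, 0, 0, 0]
--     for d in dices:
--         if 1 <= d <= 6:
--             tally[d - 1] += 1
--     return 25 if (3 in tally and 2 in tally) else 0
-- ===== Notes on version B (the rewrite author's own statement) =====
-- stated objective: simpler
-- what changed: Replaces the two break-search loops (each calling count_equal, a full scan per face) by a single tallying pass over dices into a fixed 6-slot array, then checks that 3 and 2 both occur among the tallies (a face counted 3 times can never also be the face counted 2 times).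
import Mathlib
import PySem

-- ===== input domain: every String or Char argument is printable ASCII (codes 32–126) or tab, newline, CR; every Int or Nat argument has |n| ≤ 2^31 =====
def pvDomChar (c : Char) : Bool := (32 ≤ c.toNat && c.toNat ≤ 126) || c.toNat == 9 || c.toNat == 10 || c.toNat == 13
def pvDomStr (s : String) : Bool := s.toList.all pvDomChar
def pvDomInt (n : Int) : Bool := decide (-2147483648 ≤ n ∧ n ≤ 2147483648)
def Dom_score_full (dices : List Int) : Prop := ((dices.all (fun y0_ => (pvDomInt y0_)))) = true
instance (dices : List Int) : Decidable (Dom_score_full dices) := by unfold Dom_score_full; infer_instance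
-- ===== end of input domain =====

-- B replaces A's two break-search loops (each scanning dices once per face) by one
-- tallying pass over dices followed by two membership tests (one pass instead of up to 12 scans).

-- ===== PORT A =====
-- helper count_equal: for-loop accumulating count
def count_equal (dices : List Int) (num_to_match : Int) : Int :=
  dices.foldl (fun count dice => if dice = num_to_match then count + 1 else count) 0

-- first loop of score_full: break-search for a face counted exactly 3 times
def loopThree (dices : List Int) : List Int → Int
  | [] => 0
  | d :: rest => if count_equal dices d = 3 then d else loopThree dices rest

-- second loop: break-search for another face counted exactly 2 times (stores the count 2)
def loopTwo (dices : List Int) (three_matched_num : Int) : List Int → Int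
  | [] => 0
  | d :: rest =>
    if d ≠ three_matched_num then
      if count_equal dices d = 2 then 2 else loopTwo dices three_matched_num rest
    else loopTwo dices three_matched_num rest

def score_full (dices : List Int) : Int :=
  let three_matched_num := loopThree dices (PySem.List.pyRange 1 7 1)
  let two_matched_num := loopTwo dices three_matched_num (PySem.List.pyRange 1 7 1)
  if three_matched_num > 0 ∧ two_matched_num > 0 then 25 else 0

-- ===== PORT B =====
-- one tallying step: tally[d-1] += 1 for 1 <= d <= 6
def tallyStep (tally : List Int) (d : Int) : List Int :=
  if 1 ≤ d ∧ d ≤ 6 then tally.set (d - 1).toNat (tally.getD (d - 1).toNat 0 + 1) else tally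

def score_full_alt (dices : List Int) : Int :=
  let tally := dices.foldl tallyStep [0, 0, 0, 0, 0, 0]
  if (3 : Int) ∈ tally ∧ (2 : Int) ∈ tally then 25 else 0

-- ===== PRECONDITION & SPEC =====
def Spec_score_full (dices : List Int) (out : Int) : Prop := out = score_full_alt dices
instance (dices : List Int) (out : Int) : Decidable (Spec_score_full dices out) := by unfold Spec_score_full; infer_instance

-- ===== CLAIM (what is proved, stated in full; the proofs are below) =====
def Claim_equal_score_full : Prop := ∀ (dices : List Int), Dom_score_full dices → Spec_score_full dices (score_full dices)

-- ===== LEMMAS AND PROOFS =====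

theorem count_equal_shift (l : List Int) (n : Int) (c : Int) :
    l.foldl (fun count dice => if dice = n then count + 1 else count) c
      = c + count_equal l n := by
  induction l generalizing c with
  | nil => simp [count_equal]
  | cons d rest ih =>
    rw [List.foldl_cons, ih]
    conv_rhs => rw [count_equal, List.foldl_cons, ih]
    split <;> ring

theorem count_equal_cons (d : Int) (l : List Int) (n : Int) :
    count_equal (d :: l) n = (if d = n then 1 else 0) + count_equal l n := by
  conv_lhs => rw [count_equal, List.foldl_cons, count_equal_shift]
  split <;> ring

-- the tallying fold computes exactly the six per-face counts
theorem tally_spec (dices : List Int) (a1 a2 a3 a4 a5 a6 : Int) :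
    dices.foldl tallyStep [a1, a2, a3, a4, a5, a6]
      = [a1 + count_equal dices 1, a2 + count_equal dices 2, a3 + count_equal dices 3,
         a4 + count_equal dices 4, a5 + count_equal dices 5, a6 + count_equal dices 6] := by
  induction dices generalizing a1 a2 a3 a4 a5 a6 with
  | nil => simp [count_equal]
  | cons d rest ih =>
    simp only [List.foldl_cons]
    by_cases h : 1 ≤ d ∧ d ≤ 6
    · have hd : d = 1 ∨ d = 2 ∨ d = 3 ∨ d = 4 ∨ d = 5 ∨ d = 6 := by omega
      rcases hd with h1 | h1 | h1 | h1 | h1 | h1 <;> subst h1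
      · rw [show tallyStep [a1, a2, a3, a4, a5, a6] 1 = [a1 + 1, a2, a3, a4, a5, a6] from rfl,
          ih]; simp [count_equal_cons, List.cons.injEq]; omega
      · rw [show tallyStep [a1, a2, a3, a4, a5, a6] 2 = [a1, a2 + 1, a3, a4, a5, a6] from rfl,
          ih]; simp [count_equal_cons, List.cons.injEq]; omega
      · rw [show tallyStep [a1, a2, a3, a4, a5, a6] 3 = [a1, a2, a3 + 1, a4, a5, a6] from rfl,
          ih]; simp [count_equal_cons, List.cons.injEq]; omega
      · rw [show tallyStep [a1, a2, a3, a4, a5, a6] 4 = [a1, a2, a3, a4 + 1, a5, a6] from rfl,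
          ih]; simp [count_equal_cons, List.cons.injEq]; omega
      · rw [show tallyStep [a1, a2, a3, a4, a5, a6] 5 = [a1, a2, a3, a4, a5 + 1, a6] from rfl,
          ih]; simp [count_equal_cons, List.cons.injEq]; omega
      · rw [show tallyStep [a1, a2, a3, a4, a5, a6] 6 = [a1, a2, a3, a4, a5, a6 + 1] from rfl,
          ih]; simp [count_equal_cons, List.cons.injEq]; omega
    · have h1 : d ≠ 1 := by omega
      have h2 : d ≠ 2 := by omega
      have h3 : d ≠ 3 := by omega
      have h4 : d ≠ 4 := by omega
      have h5 : d ≠ 5 := by omega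
      have h6 : d ≠ 6 := by omega
      simp only [tallyStep, if_neg h]
      rw [ih]
      simp [count_equal_cons, h1, h2, h3, h4, h5, h6]

theorem pyRange16 : PySem.List.pyRange 1 7 1 = [1, 2, 3, 4, 5, 6] := by decide

-- break-search characterizations of A's two loops
theorem loopThree_eq_zero (dices : List Int) (l : List Int) (hpos : ∀ d ∈ l, d ≠ 0)
    (h0 : loopThree dices l = 0) : ∀ d ∈ l, count_equal dices d ≠ 3 := by
  induction l with
  | nil => simp
  | cons d rest ih =>
    simp only [loopThree] at h0
    intro x hx
    rcases List.mem_cons.mp hx with hx | hx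
    · subst hx
      intro hc
      rw [if_pos hc] at h0
      exact hpos x (List.mem_cons_self) h0
    · split at h0
      · exact absurd h0 (hpos d List.mem_cons_self)
      · exact ih (fun y hy => hpos y (List.mem_cons_of_mem _ hy)) h0 x hx

theorem loopThree_ne_zero (dices : List Int) (l : List Int)
    (h0 : loopThree dices l ≠ 0) :
    loopThree dices l ∈ l ∧ count_equal dices (loopThree dices l) = 3 := by
  induction l with
  | nil => simp [loopThree] at h0
  | cons d rest ih =>
    simp only [loopThree] at h0 ⊢
    split at h0
    · simp [*]
    · rename_i hne
      rw [if_neg hne]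
      obtain ⟨h1, h2⟩ := ih h0
      exact ⟨List.mem_cons_of_mem _ h1, h2⟩

theorem loopTwo_pos_iff (dices : List Int) (t : Int) (l : List Int) :
    0 < loopTwo dices t l ↔ ∃ d ∈ l, d ≠ t ∧ count_equal dices d = 2 := by
  induction l with
  | nil => simp [loopTwo]
  | cons d rest ih =>
    simp only [loopTwo]
    by_cases hd : d ≠ t
    · rw [if_pos hd]
      by_cases hc : count_equal dices d = 2
      · rw [if_pos hc]
        simp only [List.mem_cons]
        constructor
        · intro _; exact ⟨d, Or.inl rfl, hd, hc⟩
        · intro _; norm_num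
      · rw [if_neg hc, ih]
        simp only [List.mem_cons]
        constructor
        · rintro ⟨x, hx, h⟩; exact ⟨x, Or.inr hx, h⟩
        · rintro ⟨x, hx | hx, h⟩
          · subst hx; exact absurd h.2 hc
          · exact ⟨x, hx, h⟩
    · rw [if_neg hd, ih]
      simp only [List.mem_cons]
      rw [not_not] at hd
      constructor
      · rintro ⟨x, hx, h⟩; exact ⟨x, Or.inr hx, h⟩
      · rintro ⟨x, hx | hx, h⟩
        · subst hx; exact absurd hd h.1
        · exact ⟨x, hx, h⟩

-- ===== VERDICT (by name: the statement is the Claim_ definition above) =====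
theorem score_full_spec : Claim_equal_score_full := by
  intro dices _
  show score_full dices = score_full_alt dices
  unfold score_full score_full_alt
  simp only [pyRange16, tally_spec, zero_add]
  by_cases h0 : loopThree dices [1, 2, 3, 4, 5, 6] = 0
  · refine if_congr ?_ rfl rfl
    have hall := loopThree_eq_zero dices [1, 2, 3, 4, 5, 6] (by decide) h0
    have a1 := hall 1 (by decide)
    have a2 := hall 2 (by decide)
    have a3 := hall 3 (by decide)
    have a4 := hall 4 (by decide)
    have a5 := hall 5 (by decide)
    have a6 := hall 6 (by decide)
    simp only [h0, gt_iff_lt, lt_irrefl, false_and, false_iff, List.mem_cons,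
      List.not_mem_nil, or_false]
    omega
  · obtain ⟨hmem, hcnt⟩ := loopThree_ne_zero dices [1, 2, 3, 4, 5, 6] h0
    refine if_congr ?_ rfl rfl
    simp only [List.mem_cons, List.not_mem_nil, or_false] at hmem
    simp only [gt_iff_lt, loopTwo_pos_iff]
    rcases hmem with h | h | h | h | h | h <;>
      (rw [h] at hcnt ⊢; simp only [List.mem_cons, List.not_mem_nil, or_false]; simp; omega)
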